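-- pv_equiv track=rewrite | github.com/daveboat/interview_prep | coding_practice/general/interval_check.py | check_interval
-- ===== SOURCE A (Python) =====
-- from typing import List
--
-- def check_interval(interval_list: List[tuple], interval_to_check: tuple) -> bool:
--     # sort interval list by start
--     interval_list = sorted(interval_list, key=lambda x: x[0])
--
--     # iterate through interval list, creating a list of superintervals
--     superinterval_list = []
--     for interval in interval_list:
--         # if the superinterval list is empty, add the first interval
--         if len(superinterval_list) == 0:
--             superinterval_list.append(interval)
--         # otherwise, do our checks to see if we should add a new superinterval or extend the current one, or do nothing
--         else:
--             # for convenience, get the latest superinterval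
--             current_superinterval = superinterval_list[-1]
--             # if the interval's start is greater than the current superinterval's end, then start a new superinterval
--             if interval[0] > current_superinterval[1]:
--                 superinterval_list.append(interval)
--             # else if the interval's start is less than the current superinterval's end, extend the current
--             # superinterval if the interval's end is greater than the current superinterval's end
--             else:
--                 if interval[1] > current_superinterval[1]:
--                     superinterval_list[-1] = (current_superinterval[0], interval[1])
--                 # else do nothing
--
--     # now, interate through the superinterval list. if the interval to check lies inside a superinterval, return true.
--     # else, if we've gone through the whole list, return false
--     for superinterval in superinterval_list:
--         if interval_to_check[0] >= superinterval[0] and interval_to_check[1] <= superinterval[1]: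
--             return True
--     return False
-- ===== SOURCE B (Python) =====
-- def check_interval(interval_list, interval_to_check):
--     # For each interval whose start is <= a, greedily chase the reachable end
--     # through the rest of the sorted list; no merged-interval list is built.
--     a, b = interval_to_check
--     xs = sorted(interval_list, key=lambda x: x[0])
--     for i in range(len(xs)):
--         s, e = xs[i]
--         if s <= a:
--             reach = e
--             for s2, e2 in xs[i + 1:]:
--                 if s2 > reach:
--                     break
--                 if e2 > reach:
--                     reach = e2
--             if b <= reach:
--                 return True
--     return False
-- ===== Notes on version B (the rewrite author's own statement) =====
-- stated objective: alternative
-- what changed: Instead of merging intervals into a superinterval list and scanning it, B does a per-candidate greedy reach: for each sorted interval starting at or before the query start it chases the reachable end through the following intervals (nested scans, no merged list, no rolling block state).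
import Mathlib
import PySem

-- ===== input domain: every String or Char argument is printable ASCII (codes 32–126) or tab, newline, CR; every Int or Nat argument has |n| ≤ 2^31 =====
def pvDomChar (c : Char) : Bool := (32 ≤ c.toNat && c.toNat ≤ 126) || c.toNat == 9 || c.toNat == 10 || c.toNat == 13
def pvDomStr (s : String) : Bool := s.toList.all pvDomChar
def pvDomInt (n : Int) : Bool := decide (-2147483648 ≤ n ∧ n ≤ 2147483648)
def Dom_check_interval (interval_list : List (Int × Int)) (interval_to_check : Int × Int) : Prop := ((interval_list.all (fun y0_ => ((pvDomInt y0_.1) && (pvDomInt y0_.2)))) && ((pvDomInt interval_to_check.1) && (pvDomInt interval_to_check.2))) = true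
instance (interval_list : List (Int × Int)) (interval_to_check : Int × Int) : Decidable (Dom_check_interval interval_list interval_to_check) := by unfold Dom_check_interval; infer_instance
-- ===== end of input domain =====

-- B replaces A's merge-then-scan (building a superinterval list, then checking it) by a
-- per-candidate greedy reach: for each sorted interval starting at or before the query start,
-- chase the reachable end through the following intervals; no merged list is ever built.

-- ===== PORT A =====
-- one iteration of A's first loop: extend/append to the superinterval list
def supStep (acc : List (Int × Int)) (interval : Int × Int) : List (Int × Int) :=
  if acc.length == 0 then acc ++ [interval]
  else
    let cur := acc.getLast!          -- superinterval_list[-1] (guarded by the length check)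
    if interval.1 > cur.2 then acc ++ [interval]
    else if interval.2 > cur.2 then acc.dropLast ++ [(cur.1, interval.2)]
    else acc

def check_interval (interval_list : List (Int × Int)) (interval_to_check : Int × Int) : Bool :=
  let sortedList := PySem.List.sorted interval_list (fun x => x.1) false
  let superinterval_list := sortedList.foldl supStep []
  superinterval_list.any (fun si => interval_to_check.1 ≥ si.1 && interval_to_check.2 ≤ si.2)

-- ===== PORT B =====
-- B's inner loop: chase the reachable end through the tail (break on s2 > reach)
def reachFrom (r : Int) : List (Int × Int) → Int
  | [] => r
  | (s2, e2) :: rest => if s2 > r then r else reachFrom (if e2 > r then e2 else r) rest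

-- B's outer loop over the sorted list (each head plays the role of index i, the rest is xs[i+1:])
def bLoop (a b : Int) : List (Int × Int) → Bool
  | [] => false
  | (s, e) :: rest =>
    if s ≤ a then
      if b ≤ reachFrom e rest then true else bLoop a b rest
    else bLoop a b rest

def check_interval_alt (interval_list : List (Int × Int)) (interval_to_check : Int × Int) : Bool :=
  bLoop interval_to_check.1 interval_to_check.2
    (PySem.List.sorted interval_list (fun x => x.1) false)

-- ===== PRECONDITION & SPEC =====
def Spec_check_interval (interval_list : List (Int × Int)) (interval_to_check : Int × Int) (out : Bool) : Prop := out = check_interval_alt interval_list interval_to_check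
instance (interval_list : List (Int × Int)) (interval_to_check : Int × Int) (out : Bool) : Decidable (Spec_check_interval interval_list interval_to_check out) := by unfold Spec_check_interval; infer_instance

-- ===== CLAIM (what is proved, stated in full; the proofs are below) =====
def Claim_equal_check_interval : Prop := ∀ (interval_list : List (Int × Int)) (interval_to_check : Int × Int), Dom_check_interval interval_list interval_to_check → Spec_check_interval interval_list interval_to_check (check_interval interval_list interval_to_check)

-- ===== LEMMAS AND PROOFS =====

theorem reachFrom_ge (xs : List (Int × Int)) : ∀ r : Int, r ≤ reachFrom r xs := by
  induction xs with
  | nil => intro r; simp [reachFrom]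
  | cons p rest ih =>
    intro r
    obtain ⟨s2, e2⟩ := p
    simp only [reachFrom]
    split_ifs with h1 h2
    · exact le_refl r
    · exact le_trans (le_of_lt (by omega)) (ih e2)
    · exact ih r

theorem reachFrom_mono (xs : List (Int × Int)) :
    ∀ r r' : Int, r ≤ r' → reachFrom r xs ≤ reachFrom r' xs := by
  induction xs with
  | nil => intro r r' h; simpa [reachFrom] using h
  | cons p rest ih =>
    intro r r' h
    obtain ⟨s2, e2⟩ := p
    simp only [reachFrom]
    by_cases h1 : s2 > r'
    · rw [if_pos h1, if_pos (show s2 > r by omega)]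
      exact h
    · rw [if_neg h1]
      by_cases h2 : s2 > r
      · rw [if_pos h2]
        exact le_trans h (le_trans (by split_ifs <;> omega) (reachFrom_ge rest _))
      · rw [if_neg h2]
        exact ih _ _ (by split_ifs <;> omega)

theorem supStep_concat (pre : List (Int × Int)) (cs ce : Int) (iv : Int × Int) :
    supStep (pre ++ [(cs, ce)]) iv =
      if iv.1 > ce then (pre ++ [(cs, ce)]) ++ [iv]
      else if iv.2 > ce then pre ++ [(cs, iv.2)]
      else pre ++ [(cs, ce)] := by
  simp [supStep]

-- main invariant: with (cs, ce) the open block (cs ≤ every start in xs, xs sorted by start),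
-- A's fold-then-scan equals "a closed block matched, or the open block's full reach matches,
-- or B's per-candidate loop over the remaining intervals matches"
theorem loop_invariant (a b : Int) :
    ∀ (xs pre : List (Int × Int)) (cs ce : Int),
      (∀ p ∈ xs, cs ≤ p.1) → xs.Pairwise (fun p q => p.1 ≤ q.1) →
      ((xs.foldl supStep (pre ++ [(cs, ce)])).any (fun si => a ≥ si.1 && b ≤ si.2)) =
        (pre.any (fun si => a ≥ si.1 && b ≤ si.2)
          || ((decide (cs ≤ a) && decide (b ≤ reachFrom ce xs)) || bLoop a b xs)) := by
  intro xs
  induction xs with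
  | nil =>
    intro pre cs ce _ _
    simp only [List.foldl_nil, List.any_append, List.any_cons, List.any_nil,
      reachFrom, bLoop, ge_iff_le, Bool.or_false]
    rfl
  | cons iv rest ih =>
    intro pre cs ce hlb hsorted
    obtain ⟨s, e⟩ := iv
    have hcs : cs ≤ s := hlb (s, e) (by simp)
    have hrest_lb : ∀ p ∈ rest, s ≤ p.1 := by
      intro p hp
      exact (List.pairwise_cons.mp hsorted).1 p hp
    have hrest_sorted : rest.Pairwise (fun p q => p.1 ≤ q.1) :=
      (List.pairwise_cons.mp hsorted).2
    rw [List.foldl_cons, supStep_concat]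
    by_cases h1 : s > ce
    · simp only [if_pos h1]
      rw [ih ((pre ++ [(cs, ce)])) s e hrest_lb hrest_sorted, List.any_append]
      simp only [reachFrom, if_pos (show s > ce from h1), bLoop, ge_iff_le,
        List.any_cons, List.any_nil]
      by_cases ha : s ≤ a <;> by_cases hb : b ≤ reachFrom e rest <;>
        simp [ha, hb, Bool.or_assoc, Bool.or_comm]
    · simp only [if_neg h1]
      by_cases h2 : e > ce
      · simp only [if_pos h2]
        rw [ih pre cs e (fun p hp => le_trans hcs (hrest_lb p hp)) hrest_sorted]
        simp only [reachFrom, if_neg h1, if_pos h2, bLoop]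
        by_cases ha : s ≤ a
        · have ha' : cs ≤ a := le_trans hcs ha
          by_cases hb : b ≤ reachFrom e rest <;> simp [ha, hb, ha']
        · simp [ha]
      · simp only [if_neg h2]
        rw [ih pre cs ce (fun p hp => le_trans hcs (hrest_lb p hp)) hrest_sorted]
        simp only [reachFrom, if_neg h1, if_neg h2, bLoop]
        by_cases ha : s ≤ a
        · have ha' : cs ≤ a := le_trans hcs ha
          by_cases hb : b ≤ reachFrom e rest
          · have hb' : b ≤ reachFrom ce rest :=
              le_trans hb (reachFrom_mono rest e ce (by omega))
            simp [ha, hb, ha', hb']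
          · simp [ha, hb]
        · simp [ha]

-- the two loop bodies over the (already sorted) list agree
theorem main_eq (a b : Int) (xs : List (Int × Int))
    (hs : xs.Pairwise (fun p q => p.1 ≤ q.1)) :
    ((xs.foldl supStep []).any (fun si => a ≥ si.1 && b ≤ si.2)) = bLoop a b xs := by
  cases xs with
  | nil => simp [bLoop]
  | cons iv rest =>
    obtain ⟨s, e⟩ := iv
    have h0 : supStep [] (s, e) = [] ++ [(s, e)] := by simp [supStep]
    rw [List.foldl_cons, h0,
      loop_invariant a b rest [] s e (List.pairwise_cons.mp hs).1
        (List.pairwise_cons.mp hs).2]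
    simp only [bLoop, ge_iff_le]
    by_cases ha : s ≤ a <;> simp [ha]

-- ===== VERDICT (by name: the statement is the Claim_ definition above) =====
theorem check_interval_spec : Claim_equal_check_interval := by
  intro interval_list interval_to_check _
  unfold Spec_check_interval
  exact main_eq interval_to_check.1 interval_to_check.2
    (PySem.List.sorted interval_list (fun x => x.1) false)
    (PySem.List.sorted_pairwise interval_list _)
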